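-- pv_equiv track=rewrite | github.com/Lissy93/awesome-privacy | lib/yaml_diff.py | diff_index
-- ===== SOURCE A (Python) =====
-- def diff_index(base_idx, head_idx):
--     """Return (added_keys, removed_keys, modified_keys_with_changed_fields)."""
--     base_keys, head_keys = set(base_idx), set(head_idx)
--     added = sorted(head_keys - base_keys)
--     removed = sorted(base_keys - head_keys)
--     modified = []
--     for key in sorted(base_keys & head_keys):
--         if base_idx[key] != head_idx[key]:
--             all_fields = set(base_idx[key]) | set(head_idx[key])
--             changed = sorted(f for f in all_fields if base_idx[key].get(f) != head_idx[key].get(f))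
--             modified.append((key, changed))
--     return added, removed, modified
-- ===== SOURCE B (Python) =====
-- def diff_index(base_idx, head_idx):
--     """Return (added_keys, removed_keys, modified_keys_with_changed_fields)."""
--     bkeys, hkeys = sorted(base_idx), sorted(head_idx)
--     added, removed, modified = [], [], []
--     i = j = 0
--     while i < len(bkeys) or j < len(hkeys):
--         if j == len(hkeys) or (i < len(bkeys) and bkeys[i] < hkeys[j]):
--             removed.append(bkeys[i]); i += 1
--         elif i == len(bkeys) or hkeys[j] < bkeys[i]:
--             added.append(hkeys[j]); j += 1
--         else:
--             key = bkeys[i]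
--             bd, hd = base_idx[key], head_idx[key]
--             if bd != hd:
--                 changed = [f for f in sorted(set(bd) | set(hd))
--                            if bd.get(f) != hd.get(f)]
--                 modified.append((key, changed))
--             i += 1; j += 1
--     return added, removed, modified
-- ===== Notes on version B (the rewrite author's own statement) =====
-- stated objective: alternative
-- what changed: Replaces A's set-algebra (three set differences/intersections, each sorted separately) by a two-pointer merge: both key lists are sorted once and walked in lockstep, each comparison step emitting directly into added, removed or modified.
import Mathlib
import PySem

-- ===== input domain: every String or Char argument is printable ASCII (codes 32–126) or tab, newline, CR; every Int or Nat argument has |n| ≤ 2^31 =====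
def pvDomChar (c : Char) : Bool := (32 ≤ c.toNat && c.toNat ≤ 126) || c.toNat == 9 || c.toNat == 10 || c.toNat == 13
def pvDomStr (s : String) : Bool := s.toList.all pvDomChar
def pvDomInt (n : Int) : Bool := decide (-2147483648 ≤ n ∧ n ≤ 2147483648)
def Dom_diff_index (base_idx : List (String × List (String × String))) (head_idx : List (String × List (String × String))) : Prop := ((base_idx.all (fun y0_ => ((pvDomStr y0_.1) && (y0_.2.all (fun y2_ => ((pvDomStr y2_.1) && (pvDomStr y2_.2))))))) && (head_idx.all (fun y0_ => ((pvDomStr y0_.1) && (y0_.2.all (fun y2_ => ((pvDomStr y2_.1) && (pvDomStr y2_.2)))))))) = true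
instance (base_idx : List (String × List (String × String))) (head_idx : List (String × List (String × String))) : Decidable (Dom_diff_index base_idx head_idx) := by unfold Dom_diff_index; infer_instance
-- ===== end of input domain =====

-- B replaces A's set algebra (three set differences/intersections, each sorted separately) by a
-- two-pointer merge of the two sorted key lists; same return value, similar cost (objective: alternative).

-- ===== PORT A =====
-- Shared helpers (both Pythons contain these subexpressions verbatim):
-- Python compares strings lexicographically by code point = Lean's lexicographic order on the char lists.
def pvKey (s : String) : List Char := s.toList

-- Python's `d1 != d2` on dicts compares them as unordered mappings (same key set, same value per
-- key); PySem.Dict has no such comparison, so it is ported by hand here (exact for dicts).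
def pvDictEq (d e : PySem.Dict String String) : Bool :=
  d.items.all (fun kv => e.get? kv.1 == some kv.2) && e.items.all (fun kv => d.get? kv.1 == some kv.2)

-- A's `sorted(f for f in set(bd) | set(hd) if bd.get(f) != hd.get(f))`: filtering the set then
-- sorting (without key) is exact, since the result cannot depend on the set's iteration order.
def pvChanged (bd hd : PySem.Dict String String) : List String :=
  PySem.List.sorted
    ((PySem.Set.union (PySem.Set.ofList bd.keys) hd.keys).filter (fun f => !(bd.get? f == hd.get? f)))
    pvKey false

def diff_index (base_idx : List (String × List (String × String))) (head_idx : List (String × List (String × String))) : List String × List String × (List (String × List String)) :=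
  let bdict := PySem.Dict.ofList (base_idx.map (fun p => (p.1, PySem.Dict.ofList p.2)))
  let hdict := PySem.Dict.ofList (head_idx.map (fun p => (p.1, PySem.Dict.ofList p.2)))
  let base_keys : PySem.Set String := PySem.Set.ofList bdict.keys
  let head_keys : PySem.Set String := PySem.Set.ofList hdict.keys
  let added := PySem.List.sorted (PySem.Set.diff head_keys base_keys) pvKey false
  let removed := PySem.List.sorted (PySem.Set.diff base_keys head_keys) pvKey false
  -- `base_idx[key]` with key known to be present: get? then getD never takes the default
  let modified := (PySem.List.sorted (PySem.Set.inter base_keys head_keys) pvKey false).foldl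
    (fun acc key =>
      let bv := (bdict.get? key).getD PySem.Dict.empty
      let hv := (hdict.get? key).getD PySem.Dict.empty
      if !(pvDictEq bv hv) then acc ++ [(key, pvChanged bv hv)] else acc) []
  (added, removed, modified)

-- ===== PORT B =====
-- B's `[f for f in sorted(set(bd) | set(hd)) if bd.get(f) != hd.get(f)]`: sort the union, then filter.
def pvChangedB (bd hd : PySem.Dict String String) : List String :=
  (PySem.List.sorted (PySem.Set.union (PySem.Set.ofList bd.keys) hd.keys) pvKey false).filter
    (fun f => !(bd.get? f == hd.get? f))

-- B's while-loop with two indices i, j advancing through the sorted key lists; each recursive call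
-- is one loop iteration (the appends of the loop become conses here, preserving output order).
def pvMerge (bdict hdict : PySem.Dict String (PySem.Dict String String)) :
    List String → List String → List String × List String × (List (String × List String))
  | [], [] => ([], [], [])
  | b :: bs, [] =>
    let r := pvMerge bdict hdict bs []
    (r.1, b :: r.2.1, r.2.2)
  | [], h :: hs =>
    let r := pvMerge bdict hdict [] hs
    (h :: r.1, r.2.1, r.2.2)
  | b :: bs, h :: hs =>
    if pvKey b < pvKey h then
      let r := pvMerge bdict hdict bs (h :: hs)
      (r.1, b :: r.2.1, r.2.2)
    else if pvKey h < pvKey b then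
      let r := pvMerge bdict hdict (b :: bs) hs
      (h :: r.1, r.2.1, r.2.2)
    else
      let bv := (bdict.get? b).getD PySem.Dict.empty
      let hv := (hdict.get? b).getD PySem.Dict.empty
      let r := pvMerge bdict hdict bs hs
      if !(pvDictEq bv hv) then (r.1, r.2.1, (b, pvChangedB bv hv) :: r.2.2) else r
termination_by bs hs => bs.length + hs.length

def diff_index_alt (base_idx : List (String × List (String × String))) (head_idx : List (String × List (String × String))) : List String × List String × (List (String × List String)) :=
  let bdict := PySem.Dict.ofList (base_idx.map (fun p => (p.1, PySem.Dict.ofList p.2)))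
  let hdict := PySem.Dict.ofList (head_idx.map (fun p => (p.1, PySem.Dict.ofList p.2)))
  -- `sorted(base_idx)` on a dict sorts its keys
  pvMerge bdict hdict (PySem.List.sorted bdict.keys pvKey false)
    (PySem.List.sorted hdict.keys pvKey false)

-- ===== PRECONDITION & SPEC =====
def Spec_diff_index (base_idx : List (String × List (String × String))) (head_idx : List (String × List (String × String))) (out : List String × List String × (List (String × List String))) : Prop := out = diff_index_alt base_idx head_idx
instance (base_idx : List (String × List (String × String))) (head_idx : List (String × List (String × String))) (out : List String × List String × (List (String × List String))) : Decidable (Spec_diff_index base_idx head_idx out) := by unfold Spec_diff_index; infer_instance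

-- ===== CLAIM (what is proved, stated in full; the proofs are below) =====
def Claim_equal_diff_index : Prop := ∀ (base_idx : List (String × List (String × String))) (head_idx : List (String × List (String × String))), Dom_diff_index base_idx head_idx → Spec_diff_index base_idx head_idx (diff_index base_idx head_idx)

-- ===== LEMMAS AND PROOFS =====

-- the (key, changed-fields) pair produced for a modified key
def pvModF (bdict hdict : PySem.Dict String (PySem.Dict String String)) (k : String) :
    String × List String :=
  (k, pvChanged ((bdict.get? k).getD PySem.Dict.empty) ((hdict.get? k).getD PySem.Dict.empty))

-- instance bridge: the port's `sorted` (core LT on List Char) is the one of the LinearOrder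
lemma pv_sorted_inst (xs : List String) :
    PySem.List.sorted xs pvKey false
      = @PySem.List.sorted String (List Char) (List.instLinearOrder.toLT)
          (List.instLinearOrder.toDecidableLT) xs pvKey false := by
  congr 1

lemma pv_sorted_le (xs : List String) :
    (PySem.List.sorted xs pvKey false).Pairwise (fun a b => pvKey a ≤ pvKey b) := by
  rw [pv_sorted_inst]
  have := PySem.List.sorted_pairwise (κ := List Char) xs pvKey
  exact this

lemma pv_sorted_nodup (xs : List String) (h : xs.Nodup) :
    (PySem.List.sorted xs pvKey false).Nodup :=
  (PySem.List.sorted_perm xs pvKey false).symm.nodup h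

lemma pv_sorted_lt (xs : List String) (h : xs.Nodup) :
    (PySem.List.sorted xs pvKey false).Pairwise (fun a b => pvKey a < pvKey b) := by
  have hle := pv_sorted_le xs
  have hnd : (PySem.List.sorted xs pvKey false).Pairwise (· ≠ ·) := pv_sorted_nodup xs h
  refine (hle.and hnd).imp ?_
  rintro a b ⟨h1, h2⟩
  refine lt_of_le_of_ne h1 ?_
  intro hk
  exact h2 (by simpa [pvKey, String.ext_iff] using hk)

lemma pv_eq_of_pairwise_lt (l₁ l₂ : List String)
    (h₁ : l₁.Pairwise (fun a b => pvKey a < pvKey b))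
    (h₂ : l₂.Pairwise (fun a b => pvKey a < pvKey b))
    (hm : ∀ x, x ∈ l₁ ↔ x ∈ l₂) : l₁ = l₂ := by
  have nd₁ : l₁.Nodup := h₁.imp (fun h => by rintro rfl; exact lt_irrefl _ h)
  have nd₂ : l₂.Nodup := h₂.imp (fun h => by rintro rfl; exact lt_irrefl _ h)
  have hp : l₁.Perm l₂ := (List.perm_ext_iff_of_nodup nd₁ nd₂).mpr hm
  exact hp.eq_of_pairwise (fun a b _ _ hab hba => absurd hba (lt_asymm hab)) h₁ h₂

-- B's changed-fields list (filter after sort) equals A's (sort after filter)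
lemma pvChangedB_eq (bd hd : PySem.Dict String String) :
    pvChangedB bd hd = pvChanged bd hd := by
  unfold pvChangedB pvChanged
  have ndU : (PySem.Set.union (PySem.Set.ofList bd.keys) hd.keys : List String).Nodup :=
    PySem.Set.nodup_union _ _ (PySem.Set.nodup_ofList _)
  refine pv_eq_of_pairwise_lt _ _ ((pv_sorted_lt _ ndU).filter _)
    (pv_sorted_lt _ (ndU.filter _)) ?_
  intro x
  simp [(PySem.List.sorted_perm _ _ _).mem_iff, List.mem_filter]

lemma pv_key_eq {a b : String} (h1 : ¬ pvKey a < pvKey b) (h2 : ¬ pvKey b < pvKey a) : a = b := by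
  have : pvKey a = pvKey b := le_antisymm (le_of_not_gt h2) (le_of_not_gt h1)
  simpa [pvKey, String.ext_iff] using this

-- what the merge computes on strictly sorted inputs
lemma pvMerge_eq (bdict hdict : PySem.Dict String (PySem.Dict String String))
    (bs hs : List String)
    (hb : bs.Pairwise (fun a b => pvKey a < pvKey b))
    (hh : hs.Pairwise (fun a b => pvKey a < pvKey b)) :
    pvMerge bdict hdict bs hs =
      (hs.filter (fun k => decide (k ∉ bs)),
       bs.filter (fun k => decide (k ∉ hs)),
       (bs.filter (fun k => decide (k ∈ hs) &&
          !(pvDictEq ((bdict.get? k).getD PySem.Dict.empty)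
              ((hdict.get? k).getD PySem.Dict.empty)))).map (pvModF bdict hdict)) := by
  induction bs, hs using pvMerge.induct bdict hdict with
  | case1 => simp [pvMerge]
  | case2 b bs ih =>
    rw [List.pairwise_cons] at hb
    simp [pvMerge, ih hb.2 hh]
  | case3 h hs ih =>
    rw [List.pairwise_cons] at hh
    simp [pvMerge, ih hb hh.2]
  | case4 b bs h hs hlt ih =>
    rw [List.pairwise_cons] at hb
    have hbnotin : b ∉ h :: hs := by
      intro hmem
      rcases List.mem_cons.mp hmem with rfl | hmem'
      · exact lt_irrefl _ hlt
      · exact lt_irrefl _ (hlt.trans ((List.pairwise_cons.mp hh).1 _ hmem'))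
    have hcong : ∀ x ∈ h :: hs, (decide (x ∉ b :: bs)) = (decide (x ∉ bs)) := by
      intro x hx
      have : x ≠ b := by rintro rfl; exact hbnotin hx
      simp [this]
    rw [pvMerge]
    simp only [if_pos hlt]
    rw [ih hb.2 hh]
    have hneq : b ≠ h := fun e => hbnotin (by simp [e])
    have hbns : b ∉ hs := fun e => hbnotin (by simp [e])
    refine Prod.ext ?_ (Prod.ext ?_ ?_)
    · exact (List.filter_congr hcong).symm
    · simp [hneq, hbns]
    · simp [hneq, hbns]
  | case5 b bs h hs hnlt hlt ih =>
    rw [List.pairwise_cons] at hh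
    have hhnotin : h ∉ b :: bs := by
      intro hmem
      rcases List.mem_cons.mp hmem with rfl | hmem'
      · exact lt_irrefl _ hlt
      · exact lt_irrefl _ (hlt.trans ((List.pairwise_cons.mp hb).1 _ hmem'))
    have hcong : ∀ x ∈ b :: bs,
        (decide (x ∉ h :: hs)) = (decide (x ∉ hs)) := by
      intro x hx
      have : x ≠ h := by rintro rfl; exact hhnotin hx
      simp [this]
    have hcong2 : ∀ x ∈ b :: bs,
        ((decide (x ∈ h :: hs) &&
          !(pvDictEq ((bdict.get? x).getD PySem.Dict.empty)
              ((hdict.get? x).getD PySem.Dict.empty)))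
         = (decide (x ∈ hs) &&
          !(pvDictEq ((bdict.get? x).getD PySem.Dict.empty)
              ((hdict.get? x).getD PySem.Dict.empty)))) := by
      intro x hx
      have : x ≠ h := by rintro rfl; exact hhnotin hx
      simp [this]
    rw [pvMerge]
    simp only [if_neg hnlt, if_pos hlt]
    rw [ih hb hh.2]
    have hneq : h ≠ b := fun e => hhnotin (by simp [e])
    have hhns : h ∉ bs := fun e => hhnotin (by simp [e])
    refine Prod.ext ?_ (Prod.ext ?_ ?_)
    · simp [hneq, hhns]
    · exact (List.filter_congr hcong).symm
    · rw [List.filter_congr hcong2]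
  | case6 b bs h hs hnlt hnlt' bv hv hd ih =>
    obtain rfl : b = h := pv_key_eq hnlt hnlt'
    rw [List.pairwise_cons] at hb hh
    have hbnotbs : b ∉ bs := fun hm => lt_irrefl _ (hb.1 _ hm)
    have hbnoths : b ∉ hs := fun hm => lt_irrefl _ (hh.1 _ hm)
    have hcongA : ∀ x ∈ hs, (decide (x ∉ b :: bs)) = (decide (x ∉ bs)) := by
      intro x hx
      have : x ≠ b := by rintro rfl; exact hbnoths hx
      simp [this]
    have hcongR : ∀ x ∈ bs, (decide (x ∉ b :: hs)) = (decide (x ∉ hs)) := by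
      intro x hx
      have : x ≠ b := by rintro rfl; exact hbnotbs hx
      simp [this]
    have hcongM : ∀ x ∈ bs,
        ((decide (x ∈ b :: hs) &&
          !(pvDictEq ((bdict.get? x).getD PySem.Dict.empty)
              ((hdict.get? x).getD PySem.Dict.empty)))
         = (decide (x ∈ hs) &&
          !(pvDictEq ((bdict.get? x).getD PySem.Dict.empty)
              ((hdict.get? x).getD PySem.Dict.empty)))) := by
      intro x hx
      have : x ≠ b := by rintro rfl; exact hbnotbs hx
      simp [this]
    have hd' : (!(pvDictEq ((bdict.get? b).getD PySem.Dict.empty)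
        ((hdict.get? b).getD PySem.Dict.empty))) = true := hd
    simp only [pvMerge, if_neg hnlt, if_pos hd']
    rw [ih hb.2 hh.2]
    simp only [Prod.mk.injEq]
    refine ⟨?_, ?_, ?_⟩
    · rw [List.filter_cons_of_neg (by simp), List.filter_congr hcongA]
    · rw [List.filter_cons_of_neg (by simp), List.filter_congr hcongR]
    · rw [List.filter_cons_of_pos (by simp [hd']), List.filter_congr hcongM]
      simp [pvModF, pvChangedB_eq]
  | case7 b bs h hs hnlt hnlt' bv hv hd ih =>
    obtain rfl : b = h := pv_key_eq hnlt hnlt'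
    rw [List.pairwise_cons] at hb hh
    have hbnotbs : b ∉ bs := fun hm => lt_irrefl _ (hb.1 _ hm)
    have hbnoths : b ∉ hs := fun hm => lt_irrefl _ (hh.1 _ hm)
    have hcongA : ∀ x ∈ hs, (decide (x ∉ b :: bs)) = (decide (x ∉ bs)) := by
      intro x hx
      have : x ≠ b := by rintro rfl; exact hbnoths hx
      simp [this]
    have hcongR : ∀ x ∈ bs, (decide (x ∉ b :: hs)) = (decide (x ∉ hs)) := by
      intro x hx
      have : x ≠ b := by rintro rfl; exact hbnotbs hx
      simp [this]
    have hcongM : ∀ x ∈ bs,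
        ((decide (x ∈ b :: hs) &&
          !(pvDictEq ((bdict.get? x).getD PySem.Dict.empty)
              ((hdict.get? x).getD PySem.Dict.empty)))
         = (decide (x ∈ hs) &&
          !(pvDictEq ((bdict.get? x).getD PySem.Dict.empty)
              ((hdict.get? x).getD PySem.Dict.empty)))) := by
      intro x hx
      have : x ≠ b := by rintro rfl; exact hbnotbs hx
      simp [this]
    have hd' : ¬ ((!(pvDictEq ((bdict.get? b).getD PySem.Dict.empty)
        ((hdict.get? b).getD PySem.Dict.empty))) = true) := hd
    simp only [pvMerge, if_neg hnlt, if_neg hd']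
    rw [ih hb.2 hh.2]
    simp only [Prod.mk.injEq]
    refine ⟨?_, ?_, ?_⟩
    · rw [List.filter_cons_of_neg (by simp), List.filter_congr hcongA]
    · rw [List.filter_cons_of_neg (by simp), List.filter_congr hcongR]
    · have hdq : pvDictEq ((bdict.get? b).getD PySem.Dict.empty)
          ((hdict.get? b).getD PySem.Dict.empty) = true := by
        simpa using hd'
      rw [List.filter_cons_of_neg (by simp [hdq]), List.filter_congr hcongM]

-- ===== VERDICT (by name: the statement is the Claim_ definition above) =====
theorem diff_index_spec : Claim_equal_diff_index := by
  intro base_idx head_idx _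
  unfold Spec_diff_index diff_index diff_index_alt
  dsimp only
  set bdict := PySem.Dict.ofList (base_idx.map (fun p => (p.1, PySem.Dict.ofList p.2))) with hB
  set hdict := PySem.Dict.ofList (head_idx.map (fun p => (p.1, PySem.Dict.ofList p.2))) with hH
  set bk : PySem.Set String := PySem.Set.ofList bdict.keys with hbk
  set hk : PySem.Set String := PySem.Set.ofList hdict.keys with hhk
  have ndbk : bdict.keys.Nodup := PySem.Dict.nodup_keys_ofList _
  have ndhk : hdict.keys.Nodup := PySem.Dict.nodup_keys_ofList _
  have ndb : (bk : List String).Nodup := PySem.Set.nodup_ofList _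
  have ndh : (hk : List String).Nodup := PySem.Set.nodup_ofList _
  rw [pvMerge_eq bdict hdict _ _ (pv_sorted_lt _ ndbk) (pv_sorted_lt _ ndhk)]
  rw [PySem.List.foldl_append_if
    (p := fun key => !(pvDictEq ((bdict.get? key).getD PySem.Dict.empty)
      ((hdict.get? key).getD PySem.Dict.empty)))
    (f := fun key => (key, pvChanged ((bdict.get? key).getD PySem.Dict.empty)
      ((hdict.get? key).getD PySem.Dict.empty)))]
  refine Prod.ext ?_ (Prod.ext ?_ ?_)
  · -- added
    refine pv_eq_of_pairwise_lt _ _ (pv_sorted_lt _ (PySem.Set.nodup_diff _ _ ndh))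
      ((pv_sorted_lt _ ndhk).filter _) ?_
    intro x
    simp [(PySem.List.sorted_perm _ _ _).mem_iff, PySem.Set.diff, List.mem_filter,
      PySem.Set.mem_ofList, hbk, hhk]
  · -- removed
    refine pv_eq_of_pairwise_lt _ _ (pv_sorted_lt _ (PySem.Set.nodup_diff _ _ ndb))
      ((pv_sorted_lt _ ndbk).filter _) ?_
    intro x
    simp [(PySem.List.sorted_perm _ _ _).mem_iff, PySem.Set.diff, List.mem_filter,
      PySem.Set.mem_ofList, hbk, hhk]
  · -- modified
    simp only [List.nil_append]
    refine congrArg (List.map _) ?_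
    refine pv_eq_of_pairwise_lt _ _
      ((pv_sorted_lt _ (PySem.Set.nodup_inter _ _ ndb)).filter _)
      ((pv_sorted_lt _ ndbk).filter _) ?_
    intro x
    simp [(PySem.List.sorted_perm _ _ _).mem_iff, PySem.Set.inter, List.mem_filter,
      PySem.Set.mem_ofList, hbk, hhk]
    tauto
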